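-- pv_equiv track=rewrite | github.com/WooSeok-03/Algorithm | Programmers/Python/Level1/Lotto's_highest_and_lowest_rankings.py | solution
-- ===== SOURCE A (Python) =====
-- def solution(lottos, win_nums):
--     answer = []
--     count = 0
--
--     # 최고 순위
--     for number in lottos:
--         if number in win_nums:
--             count += 1
--         elif number == 0:
--             count += 1
--
--     answer.append(count)
--     count = 0
--
--      # 최저 순위
--     for number in lottos:
--         if number in win_nums:
--             count += 1
--
--     answer.append(count)
--
--
--     for i in range(2):
--         if answer[i] == 6:
--             answer[i] = 1
--         elif answer[i] == 5:
--             answer[i] = 2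
--         elif answer[i] == 4:
--             answer[i] = 3
--         elif answer[i] == 3:
--             answer[i] = 4
--         elif answer[i] == 2:
--             answer[i] = 5
--         else:
--             answer[i] = 6
--
--     return answer
-- ===== SOURCE B (Python) =====
-- def solution(lottos, win_nums):
--     # Sort-then-merge: count matches and unmatched zeros in one two-pointer sweep,
--     # then map each count to a rank with the closed form 7 - c (for 2 <= c <= 6).
--     wins = sorted(set(win_nums))
--     nums = sorted(lottos)
--     i = j = 0
--     matched = zero_only = 0
--     while i < len(nums):
--         if j < len(wins) and wins[j] < nums[i]:
--             j += 1
--         elif j < len(wins) and wins[j] == nums[i]: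
--             matched += 1
--             i += 1
--         else:
--             if nums[i] == 0:
--                 zero_only += 1
--             i += 1
--     rank = lambda c: 7 - c if 2 <= c <= 6 else 6
--     return [rank(matched + zero_only), rank(matched)]
-- ===== Notes on version B (the rewrite author's own statement) =====
-- stated objective: faster
-- what changed: Replaces A's two membership-scan loops (each lotto number scanned against the whole win_nums list) and the six-branch elif remapping pass by a sort-then-merge algorithm: both lists are sorted (win_nums deduplicated) and a single two-pointer sweep counts matches and unmatched zeros, after which the closed form 7-c (for 2<=c<=6, else 6) yields both ranks.
import Mathlib
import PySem

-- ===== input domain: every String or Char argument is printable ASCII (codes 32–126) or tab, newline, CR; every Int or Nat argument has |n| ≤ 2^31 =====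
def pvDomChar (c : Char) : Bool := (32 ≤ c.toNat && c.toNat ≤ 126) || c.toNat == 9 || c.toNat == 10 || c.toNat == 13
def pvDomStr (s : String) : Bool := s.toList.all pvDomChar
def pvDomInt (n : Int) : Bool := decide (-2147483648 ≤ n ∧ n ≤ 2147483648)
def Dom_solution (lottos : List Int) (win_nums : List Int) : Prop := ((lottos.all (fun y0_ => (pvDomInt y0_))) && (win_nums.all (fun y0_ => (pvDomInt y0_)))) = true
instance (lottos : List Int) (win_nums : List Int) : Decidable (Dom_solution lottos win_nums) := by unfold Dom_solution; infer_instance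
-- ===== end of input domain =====

-- B replaces A's two membership-scan loops and elif remapping pass by sort + one
-- two-pointer merge sweep and a closed-form rank; proved equal on all inputs.

-- ===== PORT A =====
-- ladder of six elif branches remapping a match count to a rank (the range(2) loop body)
def ladderA (x : Int) : Int :=
  if x = 6 then 1
  else if x = 5 then 2
  else if x = 4 then 3
  else if x = 3 then 4
  else if x = 2 then 5
  else 6

def solution (lottos : List Int) (win_nums : List Int) : List Int :=
  let c1 := lottos.foldl (fun count number =>
    if number ∈ win_nums then count + 1
    else if number = 0 then count + 1
    else count) (0 : Int)
  let c2 := lottos.foldl (fun count number =>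
    if number ∈ win_nums then count + 1 else count) (0 : Int)
  [ladderA c1, ladderA c2]

-- ===== PORT B =====
-- the two-pointer while loop of Source B, as structural recursion on (nums, wins)
def mergeCnt : List Int → List Int → Int × Int
  | [], _ => (0, 0)
  | l :: L, [] =>
      let p := mergeCnt L []
      (p.1, if l = 0 then p.2 + 1 else p.2)
  | l :: L, w :: W =>
      if w < l then mergeCnt (l :: L) W
      else if w = l then
        let p := mergeCnt L (w :: W)
        (p.1 + 1, p.2)
      else
        let p := mergeCnt L (w :: W)
        (p.1, if l = 0 then p.2 + 1 else p.2)
termination_by L W => L.length + W.length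

def rankB (c : Int) : Int := if 2 ≤ c ∧ c ≤ 6 then 7 - c else 6

def solution_alt (lottos : List Int) (win_nums : List Int) : List Int :=
  let wins := PySem.List.sorted (PySem.Set.ofList win_nums) (fun x => x) false
  let nums := PySem.List.sorted lottos (fun x => x) false
  let p := mergeCnt nums wins
  [rankB (p.1 + p.2), rankB p.1]

-- ===== PRECONDITION & SPEC =====
def Spec_solution (lottos : List Int) (win_nums : List Int) (out : List Int) : Prop := out = solution_alt lottos win_nums
instance (lottos : List Int) (win_nums : List Int) (out : List Int) : Decidable (Spec_solution lottos win_nums out) := by unfold Spec_solution; infer_instance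

-- ===== CLAIM (what is proved, stated in full; the proofs are below) =====
def Claim_equal_solution : Prop := ∀ (lottos : List Int) (win_nums : List Int), Dom_solution lottos win_nums → Spec_solution lottos win_nums (solution lottos win_nums)

-- ===== LEMMAS AND PROOFS =====
theorem ladderA_eq_rankB (c : Int) : ladderA c = rankB c := by
  unfold ladderA rankB; split_ifs <;> omega

theorem foldl_count_eq_countP (pB : Int → Bool) (l : List Int) (c0 : Int) :
    l.foldl (fun c n => if pB n then c + 1 else c) c0 = c0 + (l.countP pB : Int) := by
  induction l generalizing c0 with
  | nil => simp
  | cons x xs ih =>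
    simp only [List.foldl_cons, List.countP_cons, ih]
    by_cases h : pB x = true <;> simp [h] <;> omega

theorem countP_or_split (a b : Int → Bool) (l : List Int) :
    l.countP (fun n => a n || b n)
      = l.countP a + l.countP (fun n => !a n && b n) := by
  induction l with
  | nil => simp
  | cons x xs ih =>
    simp only [List.countP_cons, ih]
    cases h : a x <;> cases h' : b x <;> simp [h, h'] <;> omega

theorem mergeCnt_spec : ∀ (L W : List Int), L.Pairwise (· ≤ ·) → W.Pairwise (· < ·) →
    mergeCnt L W = ((L.countP (fun n => decide (n ∈ W)) : Int),
                    (L.countP (fun n => !decide (n ∈ W) && decide (n = 0)) : Int)) := by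
  intro L W hL hW
  induction L, W using mergeCnt.induct with
  | case1 W => simp [mergeCnt]
  | case2 l L ih =>
    simp only [mergeCnt, ih hL.tail hW, List.countP_cons, Prod.mk.injEq]
    refine ⟨by simp, ?_⟩
    by_cases h : l = 0 <;> simp [h]
  | case3 l L w W hlt ih =>
    have hhead : ∀ x ∈ l :: L, l ≤ x := by
      intro x hx
      rcases List.mem_cons.mp hx with rfl | hx
      · exact le_refl x
      · exact List.rel_of_pairwise_cons hL hx
    have e1 : (l :: L).countP (fun n => decide (n ∈ w :: W))
        = (l :: L).countP (fun n => decide (n ∈ W)) := by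
      apply List.countP_congr
      intro x hx
      have hne : x ≠ w := by have := hhead x hx; omega
      simp [List.mem_cons, hne]
    have e2 : (l :: L).countP (fun n => !decide (n ∈ w :: W) && decide (n = 0))
        = (l :: L).countP (fun n => !decide (n ∈ W) && decide (n = 0)) := by
      apply List.countP_congr
      intro x hx
      have hne : x ≠ w := by have := hhead x hx; omega
      simp [List.mem_cons, hne]
    rw [mergeCnt, if_pos hlt, ih hL hW.tail, e1, e2]
  | case4 l L W hnlt ih =>
    rw [mergeCnt, if_neg hnlt, if_pos rfl]
    simp only [ih hL.tail hW, List.countP_cons, Prod.mk.injEq]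
    refine ⟨by simp, by simp⟩
  | case5 l L w W hnlt hne ih =>
    have hlw : l < w := by omega
    have hnotmem : l ∉ w :: W := by
      intro h
      rcases List.mem_cons.mp h with rfl | h
      · omega
      · exact absurd (List.rel_of_pairwise_cons hW h) (by omega)
    have hb : decide (l ∈ w :: W) = false := by simpa using hnotmem
    rw [mergeCnt, if_neg hnlt, if_neg hne]
    simp only [ih hL.tail hW, List.countP_cons, Prod.mk.injEq, hb]
    refine ⟨by simp, ?_⟩
    by_cases h : l = 0 <;> simp [h]

-- ===== VERDICT (by name: the statement is the Claim_ definition above) =====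
theorem solution_spec : Claim_equal_solution := by
  intro lottos win_nums _
  show _ = _
  simp only [solution, solution_alt]
  have hLs : (PySem.List.sorted lottos (fun x => x) false).Pairwise (· ≤ ·) :=
    PySem.List.sorted_pairwise lottos (fun x => x)
  have hWs : (PySem.List.sorted (PySem.Set.ofList win_nums) (fun x => x) false).Pairwise (· < ·) :=
    PySem.List.sorted_ofList_pairwise_lt win_nums
  rw [mergeCnt_spec _ _ hLs hWs]
  dsimp only
  have hperm : (PySem.List.sorted lottos (fun x => x) false).Perm lottos :=
    PySem.List.sorted_perm lottos (fun x => x) false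
  rw [List.Perm.countP_eq _ hperm, List.Perm.countP_eq _ hperm]
  have e1 : lottos.countP
      (fun n => decide (n ∈ PySem.List.sorted (PySem.Set.ofList win_nums) (fun x => x) false))
      = lottos.countP (fun n => decide (n ∈ win_nums)) := by
    apply List.countP_congr
    intro x _
    simp [PySem.List.mem_sorted, PySem.Set.mem_ofList]
  have e2 : lottos.countP
      (fun n => !decide (n ∈ PySem.List.sorted (PySem.Set.ofList win_nums) (fun x => x) false)
                && decide (n = 0))
      = lottos.countP (fun n => !decide (n ∈ win_nums) && decide (n = 0)) := by
    apply List.countP_congr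
    intro x _
    simp [PySem.List.mem_sorted, PySem.Set.mem_ofList]
  rw [e1, e2]
  have hf1 : lottos.foldl (fun count number =>
      if number ∈ win_nums then count + 1
      else if number = 0 then count + 1 else count) (0 : Int)
      = lottos.foldl (fun c n =>
          if (decide (n ∈ win_nums) || decide (n = 0)) = true then c + 1 else c) 0 := by
    congr 1
    funext c n
    by_cases h : n ∈ win_nums <;> by_cases h0 : n = 0 <;> simp [h, h0]
  have hf2 : lottos.foldl (fun count number =>
      if number ∈ win_nums then count + 1 else count) (0 : Int)
      = lottos.foldl (fun c n => if decide (n ∈ win_nums) = true then c + 1 else c) 0 := by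
    congr 1
    funext c n
    by_cases h : n ∈ win_nums <;> simp [h]
  rw [hf1, hf2, foldl_count_eq_countP, foldl_count_eq_countP, countP_or_split]
  simp only [ladderA_eq_rankB]
  push_cast
  ring_nf
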